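/- GENERATED by mk_final_copies.py from the proof of the farm's unit `vorbis_decode_packet_rest.12` (farm:vorbis_decode_packet_rest.12.1: Lemmas.lean) as the
   re-elaboration sweep compiled it — do not edit. -/
/-
  Pure lemmas (no walking) of the unit `vorbis_decode_packet_rest.12` (the inverse-MDCT loop, lines 3401–3402): what the
  assertion `Stable` gives at the loop head, and how it is carried over one call of `inverse_mdct`.
-/
import Asan.CheckWalk
import Vorbis.Spec.Units.vorbis_decode_packet_rest_12
import Vorbis.Spec.PacketRestFrame
import Vorbis.Spec.MdctUse

open X86 X86.User Asan Vorbis Vorbis.Spec Vorbis.Spec.vorbis_decode_packet_rest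

set_option maxRecDepth 4000
set_option maxHeartbeats 4000000

namespace Vorbis.Spec.vorbis_decode_packet_rest_12

variable {u₀ : State} {others : List Obj} {frames : List (Nat × FrameLayout)} {len : Nat} {Ar : Arena}
  {stored room : Int} {mode : Nat} {ysz : Nat → Nat} {u : State} {ret : Word} {v : State}

/-- The stack room of the function's entry, as a number. -/
theorem frame_room (h : Frame u₀ others frames len Ar stored room mode ysz u ret v) :
    0x700000 + 3856 ≤ (u.reg .rsp).toNat ∧ (u.reg .rsp).toNat + 8 ≤ 0x800000 := by
  have hroom := h.entry.room
  have htop := h.entry.top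
  simp only [vspec, Vorbis.conv_stackLo, Vorbis.conv_stackHi] at hroom htop
  exact ⟨hroom, htop⟩

/-- `*f` reads at a cut point as at the function's entry, outside its decode-time holes: every span of the function's footprint
is a decode-time store (`footprint_storeOK`). -/
theorem frame_decodeSame (h : Frame u₀ others frames len Ar stored room mode ysz u ret v) :
    DecodeSame (fOf u) u.mem v.mem := by
  have hroom := (frame_room h).1
  have hpre := h.pre
  have hinv : DecodeInv others frames len Ar stored room ysz u.mem (fOf u) := hpre.2.1
  exact StoreOK.decodeSame hinv.ok hinv.ob1 hinv.sep h.same (fun s hs => footprint_storeOK hpre hroom s hs)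

/-- One store of 8 bytes into the stack region (the push of a return address), as a footprint. -/
theorem push_same (mem : Mem) (a : Word) (x : Nat) (ha : a.toNat + 8 ≤ 0x800000) :
    Mem.SameExcept [⟨a.toNat, a.toNat + 8⟩] mem (mem.writeLE a 8 x) := by
  apply Mem.SameExcept.writeLE
  · omega
  · exact ⟨⟨a.toNat, a.toNat + 8⟩, List.mem_singleton.mpr rfl, Nat.le_refl _, Nat.le_refl _⟩

/-- A store into the stack region writes no shadow byte. -/
theorem push_untouched (mem : Mem) (a : Word) (x : Nat) (ha : a.toNat + 8 ≤ 0x800000) :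
    ShadowUntouched mem (mem.writeLE a 8 x) := by
  unfold ShadowUntouched
  apply (push_same mem a x ha).eqOn
  intro w hw
  rw [List.mem_singleton.mp hw]
  simp only []
  omega

/-- **The decode-time invariant and the shadow layer over the push of a return address** (`DecodeInv.carry` with the same
frames: a store into the stack region meets no allocated block and no shadow byte). -/
theorem push_inv {frs : List (Nat × FrameLayout)} {mem : Mem} {f top : Nat}
    (h : DecodeInv others frs len Ar stored room ysz mem f) (hsh : ShadowInv others frs top mem)
    (a : Word) (x : Nat) (ha1 : 0x700000 ≤ a.toNat) (ha2 : a.toNat + 8 ≤ 0x800000) :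
    DecodeInv others frs len Ar stored room ysz (mem.writeLE a 8 x) f ∧ ShadowInv others frs top (mem.writeLE a 8 x) := by
  have hsh' : ShadowInv others frs top (mem.writeLE a 8 x) := hsh.untouched (push_untouched mem a x ha2)
  refine ⟨h.carry hsh ?_ hsh', hsh'⟩
  apply AllKept.of_sameExcept h.ok (push_same mem a x ha2)
  intro B hB w hw
  rw [List.mem_singleton.mp hw]
  have := h.offStack B hB
  simp only []
  omega

/-- **The footprint of inverse_mdct as decode-time stores** (`inverse_mdct.storeOK` with the stack room as numbers: the walker's
`call_room` / `call_top`, not an `AtEntry`). -/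
theorem mdct_storeOK {frs : List (Nat × FrameLayout)} {k c : Nat} {s : State}
    (h : inverse_mdct.Pre others frs len Ar stored room ysz k c s)
    (hroom : 0x700000 + 368 ≤ (s.reg .rsp).toNat) (htop : (s.reg .rsp).toNat + 8 ≤ 0x800000) (w : Span)
    (hw : w ∈ (inverse_mdct.spec others frs len Ar stored room ysz k c).footprint s) :
    StoreOK (RunBlk Ar len) s.mem (inverse_mdct.f s) w := by
  have hr := h.tmp_range
  have hnle := h.n_le
  unfold Spec.footprint at hw
  simp only [inverse_mdct.spec_frame, inverse_mdct.spec_writes, List.mem_cons, List.mem_nil_iff, or_false] at hw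
  rcases hw with rfl | rfl | rfl | rfl | rfl
  · -- the stack area
    apply StoreOK.off
    intro B hB
    have := h.offStack B hB
    simp only []
    omega
  · -- buffer[0 .. n)
    refine StoreOK.buffer ⟨stb_vorbis.channel_buffers s.mem (inverse_mdct.f s) c, 4 * bsize s.mem (inverse_mdct.f s) 1⟩
      (SampleBuf.chan c h.chan) ?_ ?_
    · simp only []
      rw [← h.buffer]
      exact Nat.le_refl _
    · simp only []
      rw [← h.buffer]
      omega
  · -- the temp block
    apply StoreOK.off
    intro B hB
    have := h.blk_off_tmp hB
    simp only []
    omega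
  · -- temp_offset
    exact StoreOK.hole (InHole.of_field (inverse_mdct.f s) 132 4 (by omega))
  · -- the shadow of the temp block and its red zone
    apply StoreOK.off
    intro B hB
    have hin := h.ok.inside B hB
    unfold shadowSpan
    simp only []
    omega

/-- **The decode-time invariant after a call of inverse_mdct** (`DecodeInv.frame_stores` over the callee's footprint): the
environment from the post's shadow layer, ADO from the post, `Bits` / M7 / W1 because `*f` reads exactly as before. -/
theorem mdct_inv {frs : List (Nat × FrameLayout)} {k c : Nat} {s s' : State}
    (h : inverse_mdct.Pre others frs len Ar stored room ysz k c s)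
    (hroom : 0x700000 + 368 ≤ (s.reg .rsp).toNat) (htop : (s.reg .rsp).toNat + 8 ≤ 0x800000)
    (hsame : Mem.SameExcept ((inverse_mdct.spec others frs len Ar stored room ysz k c).footprint s) s.mem s'.mem)
    (hpost : (inverse_mdct.spec others frs len Ar stored room ysz k c).post s s') :
    DecodeInv others frs len Ar stored room ysz s'.mem (inverse_mdct.f s) := by
  obtain ⟨hshadow, hado, hobj⟩ := hpost
  have hinv := h.inv
  have hv := hinv.fb.vorbis
  have hf : inverse_mdct.f s + Off.sizeof.stb_vorbis ≤ 2 ^ 64 := by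
    have := hv.bits.OBR.2
    omega
  have hos : ObjSame (inverse_mdct.f s) s.mem s'.mem := ObjSame.of_same hobj hf
  exact hinv.frame_stores hsame (mdct_storeOK h hroom htop) ⟨hshadow.shadow.covers, hinv.ok, hinv.live⟩ hado
    (fun _ => hv.bits.frame_fields (Bits.SameFields.of_same hobj))
    (fun _ => hv.buffers.M7.frame hos)
    (fun _ => hv.w1.frame hos)

/-- The footprint of inverse_mdct entered at `s`, as a literal list. -/
theorem mdct_footprint {frs : List (Nat × FrameLayout)} {k c : Nat} (s : State) :
    (inverse_mdct.spec others frs len Ar stored room ysz k c).footprint s =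
      [⟨(s.reg .rsp).toNat - 368, (s.reg .rsp).toNat⟩,
       ⟨inverse_mdct.buf s, inverse_mdct.buf s + 4 * inverse_mdct.n s⟩,
       ⟨inverse_mdct.tmp Ar s, inverse_mdct.tmp Ar s + 2 * inverse_mdct.n s⟩,
       ⟨inverse_mdct.f s + 132, inverse_mdct.f s + 136⟩,
       shadowSpan (inverse_mdct.tmp Ar s) (Ar.B + Ar.T)] := by
  unfold Spec.footprint
  simp only [inverse_mdct.spec_frame, inverse_mdct.spec_writes]

/-- **Where the windows of one round of the loop are** (the push of the return address at `[rsp₀ − 3008, rsp₀ − 3000)` and the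
footprint of inverse_mdct entered below it), as arithmetic: the facts every frame argument of `stable_step` is made from. -/
structure Where (Ar : Arena) (u s : State) : Prop where
  /-- the function's stack room -/
  room : 0x700000 + 3856 ≤ (u.reg .rsp).toNat
  top : (u.reg .rsp).toNat + 8 ≤ 0x800000
  /-- the callee's stack pointer -/
  rsp : (s.reg .rsp).toNat = (u.reg .rsp).toNat - 3008
  /-- the decoder object: in the data space, off the stack region -/
  f_eq : inverse_mdct.f s = fOf u
  obj_in : 0x400000 ≤ fOf u ∧ fOf u + 1808 ≤ 0xC00000
  obj_off : fOf u + 1808 ≤ 0x700000 ∨ 0x800020 ≤ fOf u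
  /-- the sample buffer: in the data space, off the stack region -/
  buf_in : 0x100000 ≤ inverse_mdct.buf s ∧ inverse_mdct.buf s + 4 * inverse_mdct.n s ≤ 0xC00000
  buf_off : inverse_mdct.buf s + 4 * inverse_mdct.n s ≤ 0x700000 ∨ 0x800020 ≤ inverse_mdct.buf s
  /-- the temp block and its red zone: inside the arena's free gap, which is in the data space and off the stack region -/
  tmp_lo : Ar.B + Ar.S ≤ inverse_mdct.tmp Ar s
  /-- … behind the arena's first red zone (an arena block above the stack region begins at `800020H` or later: the stack
  arguments at `[rsp₀ + 8, rsp₀ + 24)` cannot meet it even when they reach beyond `800000H`) -/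
  tmp_red : Ar.B + 32 ≤ inverse_mdct.tmp Ar s
  tmp_hi : inverse_mdct.tmp Ar s + 2 * inverse_mdct.n s + 32 = Ar.B + Ar.T
  full : Ar.T = Ar.L
  ar_in : 0x100000 ≤ Ar.B ∧ Ar.B + Ar.L ≤ 0xC00000
  ar_off : Ar.B + Ar.L ≤ 0x700000 ∨ 0x800000 ≤ Ar.B

/-- `Where` from the cut-point assertion and inverse_mdct's precondition. -/
theorem where_of {ls : Int} {k c : Nat} {s : State}
    (hst : Stable u₀ others frames len Ar stored room mode ysz u ret ls v)
    (hsr : (s.reg .rsp).toNat = (u.reg .rsp).toNat - 3008) (hsf : inverse_mdct.f s = fOf u)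
    (hpre : inverse_mdct.Pre others (framesIn frames u) len Ar stored room ysz k c s) : Where Ar u s := by
  obtain ⟨hroom, htop⟩ := frame_room hst.toFrame
  have hinv := hst.inv
  have hobr := hinv.fb.vorbis.bits.OBR
  have hoff := hinv.objOff
  simp only [voff] at hobr hoff
  have hbuf := hpre.buf_blk
  have hbin := hpre.ok.inside _ hbuf
  have hboff := hpre.offStack _ hbuf
  have hnle := hpre.n_le
  have hn64 := hpre.isBlocksize.facts
  simp only [] at hbin hboff
  obtain ⟨t1, t2, t3, _⟩ := hpre.tmp_range
  have a1 := hinv.arena.AR1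
  have a1x := hinv.arena.AR1x
  -- `*f` and the sample buffer are setup blocks of the arena: behind its first red zone
  have hfb : Ar.Block (objBlock (fOf u)).base (objBlock (fOf u)).size := hinv.obj
  have hfr := hinv.arena.block_range hfb
  have hl8 := le_r8 (objBlock (fOf u)).size
  simp only [vblock, voff] at hfr hl8
  have hbb : Ar.Blk ⟨stb_vorbis.channel_buffers s.mem (inverse_mdct.f s) c, 4 * bsize s.mem (inverse_mdct.f s) 1⟩ := by
    rcases hpre.inv.buf _ (SampleBuf.chan c hpre.chan) with h0 | hb
    · simp only [] at h0
      omega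
    · exact hb
  rw [← hpre.buffer] at hbb
  have hbb' : Ar.Block (inverse_mdct.buf s) (4 * bsize s.mem (inverse_mdct.f s) 1) := hbb
  have hbr := hpre.inv.arena.block_range hbb'
  exact ⟨hroom, htop, hsr, hsf, hobr, by omega, ⟨hbin.1, by omega⟩, by omega, t1, by omega, t2, t3, ⟨a1x.1, a1.2.2.2⟩, a1x.2⟩

/-- The slot of the pushed return address, as a number. -/
theorem toNat_push_slot (a : Word) (h : 3856 ≤ a.toNat) : (a - 3008).toNat = a.toNat - 3008 := by
  u_omega

/-- **One round of the loop keeps a range that meets none of its windows**: the push of the return address, then the footprint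
of inverse_mdct. -/
theorem round_eqOn {frs : List (Nat × FrameLayout)} {k c : Nat} {s s' : State} {x : Nat} (hw : Where Ar u s)
    (hsm : s.mem = v.mem.writeLE (u.reg .rsp - 3008) 8 x)
    (hsame : Mem.SameExcept ((inverse_mdct.spec others frs len Ar stored room ysz k c).footprint s) s.mem s'.mem)
    (lo hi : Nat)
    (h1 : hi ≤ (u.reg .rsp).toNat - 3376 ∨ (u.reg .rsp).toNat - 3000 ≤ lo)
    (h2 : hi ≤ inverse_mdct.buf s ∨ inverse_mdct.buf s + 4 * inverse_mdct.n s ≤ lo)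
    (h3 : hi ≤ inverse_mdct.tmp Ar s ∨ Ar.B + Ar.T ≤ lo)
    (h4 : hi ≤ fOf u + 132 ∨ fOf u + 136 ≤ lo)
    (h5 : hi ≤ 0xC00000) : Mem.EqOn lo hi v.mem s'.mem := by
  obtain ⟨hroom, htop, hrsp, hfeq, hoin, hooff, hbin, hboff, htlo, htred, hthi, hfull, hain, haoff⟩ := hw
  have hp := toNat_push_slot (u.reg .rsp) (by omega)
  have e1 : Mem.EqOn lo hi v.mem s.mem := by
    rw [hsm]
    apply (push_same v.mem (u.reg .rsp - 3008) x (by omega)).eqOn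
    intro w hw
    rw [List.mem_singleton.mp hw]
    simp only []
    omega
  apply e1.trans
  apply hsame.eqOn
  rw [mdct_footprint]
  intro w hw
  simp only [List.mem_cons, List.mem_nil_iff, or_false] at hw
  rcases hw with rfl | rfl | rfl | rfl | rfl
  · simp only []
    omega
  · simp only []
    omega
  · simp only []
    omega
  · simp only []
    omega
  · unfold shadowSpan
    simp only []
    omega

/-- **The function's stack frame above the steady stack pointer, the caller's arguments and the caller's stack objects read after
one round as before.** -/
theorem round_stack {frs : List (Nat × FrameLayout)} {k c : Nat} {s s' : State} {x : Nat} (hw : Where Ar u s)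
    (hsm : s.mem = v.mem.writeLE (u.reg .rsp - 3008) 8 x)
    (hsame : Mem.SameExcept ((inverse_mdct.spec others frs len Ar stored room ysz k c).footprint s) s.mem s'.mem) :
    Mem.EqOn ((u.reg .rsp).toNat - 3000) 0x800010 v.mem s'.mem := by
  have hw' := hw
  obtain ⟨hroom, htop, hrsp, hfeq, hoin, hooff, hbin, hboff, htlo, htred, hthi, hfull, hain, haoff⟩ := hw'
  apply round_eqOn hw hsm hsame
  · omega
  · omega
  · omega
  · omega
  · omega

/-- **`*f` reads after one round as before**: the push is off the object, and inverse_mdct's post says `*f` is the same. -/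
theorem round_obj {frs : List (Nat × FrameLayout)} {k c : Nat} {s s' : State} {x : Nat} (hw : Where Ar u s)
    (hsm : s.mem = v.mem.writeLE (u.reg .rsp - 3008) 8 x)
    (hpost : (inverse_mdct.spec others frs len Ar stored room ysz k c).post s s') :
    (objBlock (fOf u)).Kept v.mem s'.mem := by
  obtain ⟨hroom, htop, hrsp, hfeq, hoin, hooff, hbin, hboff, htlo, htred, hthi, hfull, hain, haoff⟩ := hw
  have hp := toNat_push_slot (u.reg .rsp) (by omega)
  have hobj : (objBlock (fOf u)).Same s.mem s'.mem := by
    rw [← hfeq]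
    exact hpost.2.2
  have e1 : (objBlock (fOf u)).Same v.mem s.mem := by
    rw [hsm]
    apply (push_same v.mem (u.reg .rsp - 3008) x (by omega)).eqOn
    intro w hw
    rw [List.mem_singleton.mp hw]
    simp only [vblock, voff]
    omega
  refine ⟨e1.trans hobj, ?_⟩
  simp only [vblock, voff]
  omega

/-- **The function's footprint after one round** (`Frame.same` again): the push lies in the function's stack area; of the
callee's windows, the stack window too, the buffer window lies in the block of `channel_buffers[c]` (read at the function's entry:
`DecodeSame`), the temp block and its shadow in the arena's free gap resp. its shadow, `temp_offset` in a hole of `*f`. -/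
theorem round_same {ls : Int} {k c : Nat} {s s' : State} {x : Nat}
    (hst : Stable u₀ others frames len Ar stored room mode ysz u ret ls v) (hw : Where Ar u s)
    (hsm : s.mem = v.mem.writeLE (u.reg .rsp - 3008) 8 x)
    (hpre : inverse_mdct.Pre others (framesIn frames u) len Ar stored room ysz k c s)
    (hsame : Mem.SameExcept ((inverse_mdct.spec others (framesIn frames u) len Ar stored room ysz k c).footprint s)
      s.mem s'.mem) :
    Mem.SameExcept ((vorbis_decode_packet_rest.spec others frames len Ar stored room mode ysz).footprint u) u.mem s'.mem := by
  have hw' := hw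
  obtain ⟨hroom, htop, hrsp, hfeq, hoin, hooff, hbin, hboff, htlo, htred, hthi, hfull, hain, haoff⟩ := hw'
  have hp := toNat_push_slot (u.reg .rsp) (by omega)
  have hinv0 : DecodeInv others frames len Ar stored room ysz u.mem (fOf u) := hst.pre.2.1
  -- `*f` at the callee's entry reads as at the function's entry outside the holes
  have hd1 : DecodeSame (fOf u) u.mem v.mem := frame_decodeSame hst.toFrame
  have hd2 : DecodeSame (fOf u) v.mem s.mem := by
    rw [hsm]
    apply DecodeSame.of_writeLE v.mem (fOf u) (u.reg .rsp - 3008) 8 x (by omega) (by simp only [voff]; omega)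
    omega
  have hd : DecodeSame (fOf u) u.mem s.mem := hd1.trans hd2
  obtain ⟨ech, eb1, eptr⟩ := ConfigOK.buffers_eq (hd.sub ConfigOK.wins_decode) hinv0.config.header.HD1.2
  have hchan : (c : Int) < stb_vorbis.channels u.mem (fOf u) := by
    have := hpre.chan
    rw [hfeq, ech] at this
    exact this
  have hbuf : inverse_mdct.buf s = stb_vorbis.channel_buffers u.mem (fOf u) c := by
    rw [hpre.buffer, hfeq]
    exact (eptr c hchan).1
  have hnle : inverse_mdct.n s ≤ bsize u.mem (fOf u) 1 := by
    have := hpre.n_le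
    rw [hfeq, eb1] at this
    exact this
  -- the push
  have same_s : Mem.SameExcept ((vorbis_decode_packet_rest.spec others frames len Ar stored room mode ysz).footprint u)
      u.mem s.mem := by
    rw [hsm]
    apply hst.same.step_same (push_same v.mem (u.reg .rsp - 3008) x (by omega))
    intro w hw a h1 h2
    rw [List.mem_singleton.mp hw] at h1 h2
    simp only [] at h1 h2
    exact covered_footprint others frames len Ar stored room mode ysz u a (Or.inl ⟨by omega, by omega⟩)
  -- the callee
  apply same_s.step_same hsame
  rw [mdct_footprint]
  intro w hw a h1 h2
  apply covered_footprint others frames len Ar stored room mode ysz u a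
  simp only [List.mem_cons, List.mem_nil_iff, or_false] at hw
  rcases hw with rfl | rfl | rfl | rfl | rfl
  · -- the callee's stack
    simp only [] at h1 h2
    exact Or.inl ⟨by omega, by omega⟩
  · -- buffer[0 .. n)
    simp only [] at h1 h2
    refine Or.inr (Or.inr (Or.inr (Or.inl ⟨c, ?_, ?_, ?_⟩)))
    · rw [nchan_def]
      omega
    · omega
    · omega
  · -- the temp block
    simp only [] at h1 h2
    exact Or.inr (Or.inr (Or.inr (Or.inr (Or.inl ⟨by omega, by omega⟩))))
  · -- temp_offset
    simp only [] at h1 h2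
    refine Or.inr (Or.inl ⟨⟨fOf u + 132, fOf u + 144⟩, ?_, ?_, ?_⟩)
    · simp only [holes, List.mem_cons, List.mem_nil_iff, or_false, true_or, or_true]
    · simp only []
      omega
    · simp only []
      omega
  · -- the shadow of the temp block and its red zone
    unfold shadowSpan at h1 h2
    simp only [] at h1 h2
    refine Or.inr (Or.inr (Or.inr (Or.inr (Or.inr (Or.inr (Or.inr (Or.inr ?_)))))))
    unfold shadowSpan
    simp only []
    omega

/-- The channel count reads the same in a memory in which `*f` does. -/
theorem channels_kept {mem mem' : Mem} {f : Nat} (h : (objBlock f).Kept mem mem') :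
    stb_vorbis.channels mem' f = stb_vorbis.channels mem f := by
  simp only [vacc, voff]
  exact h.i32 _ (by simp only [vblock]; omega) (by simp only [vblock, voff]; omega)

/-- `n = blocksize[m->blockflag]` reads the same in a memory in which `*f` does, for a mode record `m` of `*f`. -/
theorem nOf_kept {mem mem' : Mem} {f md : Nat} (h : (objBlock f).Kept mem mem') (hmd : md < 64) :
    nOf mem' f (stb_vorbis.mode_config_at f md) = nOf mem f (stb_vorbis.mode_config_at f md) := by
  unfold nOf
  have e0 : stb_vorbis.blocksize_0 mem' f = stb_vorbis.blocksize_0 mem f := by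
    simp only [vacc, voff]
    exact h.i32 _ (by simp only [vblock]; omega) (by simp only [vblock, voff]; omega)
  have e1 : stb_vorbis.blocksize_1 mem' f = stb_vorbis.blocksize_1 mem f := by
    simp only [vacc, voff]
    exact h.i32 _ (by simp only [vblock]; omega) (by simp only [vblock, voff]; omega)
  have eb : Mode.blockflag mem' (stb_vorbis.mode_config_at f md) = Mode.blockflag mem (stb_vorbis.mode_config_at f md) := by
    simp only [vacc, voff]
    exact h.u8 _ (by simp only [vblock]; omega) (by simp only [vblock, voff]; omega)
  rw [eb]
  exact bsize_congr e0 e1 _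

/-- `n` of the arguments' mode record reads the same in a memory in which `*f` does. -/
theorem nOf_step {w : State} (h : Frame u₀ others frames len Ar stored room mode ysz u ret v)
    (hK : (objBlock (fOf u)).Kept v.mem w.mem) : nOf w.mem (fOf u) (mOf u) = nOf v.mem (fOf u) (mOf u) := by
  have hinv0 : DecodeInv others frames len Ar stored room ysz u.mem (fOf u) := h.pre.2.1
  have hargs : Args others frames mode u := h.pre.2.2
  rw [hargs.m_eq]
  exact nOf_kept hK (hinv0.fb.vorbis.mode.mode_index_lt hargs.mode_lt)

/-- The mode index of the arguments is below 64 (MD1 at the function's entry). -/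
theorem mode_lt_64 (h : Frame u₀ others frames len Ar stored room mode ysz u ret v) : mode < 64 := by
  have hinv0 : DecodeInv others frames len Ar stored room ysz u.mem (fOf u) := h.pre.2.1
  have hargs : Args others frames mode u := h.pre.2.2
  exact hinv0.fb.vorbis.mode.mode_index_lt hargs.mode_lt

/-- **STABLE in a later state `w`** whose memory agrees with the one of `v` on the function's frame above the steady stack
pointer and on the callers' stack (`heq`) and on `*f` (`hK`), given the memory-dependent clauses of `Frame` afresh (the footprint,
the shadow layer, the invariant) and the steady stack pointer, the text, the ABI's invariant. With it: the slot `[rsp + 0]`. -/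
theorem stable_of_eqOn {ls : Int} {w : State}
    (hst : Stable u₀ others frames len Ar stored room mode ysz u ret ls v) (hsb : slot64 u v 0x0 = sbOf u)
    (heq : Mem.EqOn ((u.reg .rsp).toNat - 3000) 0x800010 v.mem w.mem)
    (hK : (objBlock (fOf u)).Kept v.mem w.mem)
    (hsamew : Mem.SameExcept ((vorbis_decode_packet_rest.spec others frames len Ar stored room mode ysz).footprint u)
      u.mem w.mem)
    (hshadow : ShadowInv others (framesIn frames u) (spOf u).toNat w.mem)
    (hinv : DecodeInv others (framesIn frames u) len Ar stored room ysz w.mem (fOf u))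
    (hwr : w.reg .rsp = spOf u) (hwc : CodeOK u₀ w.mem) (hwa : abiInv w) :
    Stable u₀ others frames len Ar stored room mode ysz u ret ls w ∧ slot64 u w 0x0 = sbOf u := by
  obtain ⟨hroom, htop⟩ := frame_room hst.toFrame
  -- a read in the function's frame above the steady stack pointer, or in the callers' stack
  have rd : ∀ (a : Word) (n : Nat), (u.reg .rsp).toNat - 3000 ≤ a.toNat → a.toNat + n ≤ 0x800010 →
      w.mem.readLE a n = v.mem.readLE a n := by
    intro a n h1 h2
    exact heq.readLE a n h1 h2 (by omega)
  have hsp : (u.reg .rsp).toNat ≤ 0x800000 := by omega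
  have hmd := mode_lt_64 hst.toFrame
  have hargs : Args others frames mode u := hst.pre.2.2
  have hsh0 : ShadowPre others frames u := hst.pre.1
  -- `p_left` is a stack object of a caller: above the function's return address
  have hleft : (u.reg .rsp).toNat + 8 ≤ pLeftOf u ∧ pLeftOf u + 4 ≤ 0x800000 := by
    obtain ⟨hl, h1, h2⟩ := hargs.left_obj
    have := hl.above hsh0.inv
    omega
  have hn : nOf w.mem (fOf u) (mOf u) = nOf v.mem (fOf u) (mOf u) := by
    rw [hargs.m_eq]
    exact nOf_kept hK hmd
  refine ⟨⟨⟨hst.entry, hst.pre, hwr, hwc, hwa, hsamew, ?_, ?_, ?_, ?_, ?_, ?_, ?_, hshadow, hinv⟩,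
    ?_, ?_, ?_, ?_, ?_, ?_, ?_, ?_, ?_, ?_, ?_⟩, ?_⟩
  · rw [rd _ _ (by u_omega) (by u_omega)]
    exact hst.ra
  · rw [rd _ _ (by u_omega) (by u_omega)]
    exact hst.s_r15
  · rw [rd _ _ (by u_omega) (by u_omega)]
    exact hst.s_r14
  · rw [rd _ _ (by u_omega) (by u_omega)]
    exact hst.s_r13
  · rw [rd _ _ (by u_omega) (by u_omega)]
    exact hst.s_r12
  · rw [rd _ _ (by u_omega) (by u_omega)]
    exact hst.s_rbp
  · rw [rd _ _ (by u_omega) (by u_omega)]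
    exact hst.s_rbx
  · exact (rd _ _ (by u_omega) (by u_omega)).trans hst.slot_f
  · exact (rd _ _ (by u_omega) (by u_omega)).trans hst.slot_len
  · exact (rd _ _ (by u_omega) (by u_omega)).trans hst.slot_m
  · rw [show slot32 u w 0x78 = slot32 u v 0x78 from rd _ _ (by u_omega) (by u_omega)]
    exact hst.slot_ls
  · rw [show slot32 u w 0x7c = slot32 u v 0x7c from rd _ _ (by u_omega) (by u_omega)]
    exact hst.slot_rs
  · exact (rd _ _ (by u_omega) (by u_omega)).trans (hst.slot_n.trans hn.symm)
  · rw [hn]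
    exact (rd _ _ (by u_omega) (by u_omega)).trans hst.slot_n2
  · exact (rd _ _ (by u_omega) (by u_omega)).trans hst.slot_sb
  · rw [rd _ _ (by u_omega) (by u_omega)]
    exact hst.arg_re
  · exact (rd _ _ (by u_omega) (by u_omega)).trans hst.arg_left
  · -- mem32[p_left]
    have e : w.mem.i32 (pLeftOf u) = v.mem.i32 (pLeftOf u) := by
      have ha : (addr (pLeftOf u)).toNat = pLeftOf u := toNat_addr _ (by omega)
      rw [Mem.i32_def, Mem.i32_def]
      show sint32 (w.mem.readLE (addr (pLeftOf u)) 4) = sint32 (v.mem.readLE (addr (pLeftOf u)) 4)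
      rw [rd _ _ (by omega) (by omega)]
    rw [e]
    exact hst.left_val
  · exact (rd _ _ (by u_omega) (by u_omega)).trans hsb

/-- **STABLE in a later state with the same memory** (registers and flags changed only). -/
theorem stable_congr {ls : Int} {w : State}
    (hst : Stable u₀ others frames len Ar stored room mode ysz u ret ls v) (hsb : slot64 u v 0x0 = sbOf u)
    (hwm : w.mem = v.mem) (hwr : w.reg .rsp = spOf u) (hwa : abiInv w) :
    Stable u₀ others frames len Ar stored room mode ysz u ret ls w ∧ slot64 u w 0x0 = sbOf u := by
  have hobr := hst.inv.fb.vorbis.bits.OBR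
  apply stable_of_eqOn hst hsb
  · rw [hwm]
    exact Mem.EqOn.refl _ _ _
  · rw [hwm]
    exact Block.Kept.refl _ _ (by simp only [vblock, voff] at hobr ⊢; omega)
  · rw [hwm]
    exact hst.same
  · rw [hwm]
    exact hst.shadow
  · rw [hwm]
    exact hst.inv
  · exact hwr
  · rw [hwm]
    exact hst.code
  · exact hwa

/-- **STABLE over the push of a return address** at `[rsp₀ − 3008, rsp₀ − 3000)` (a check call that has returned). -/
theorem stable_push {ls : Int} {w : State} {x : Nat}
    (hst : Stable u₀ others frames len Ar stored room mode ysz u ret ls v) (hsb : slot64 u v 0x0 = sbOf u)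
    (hwm : w.mem = v.mem.writeLE (u.reg .rsp - 3008) 8 x) (hwr : w.reg .rsp = spOf u) (hwc : CodeOK u₀ w.mem)
    (hwa : abiInv w) :
    Stable u₀ others frames len Ar stored room mode ysz u ret ls w ∧ slot64 u w 0x0 = sbOf u := by
  obtain ⟨hroom, htop⟩ := frame_room hst.toFrame
  have hp := toNat_push_slot (u.reg .rsp) (by omega)
  have hobr := hst.inv.fb.vorbis.bits.OBR
  have hoff := hst.inv.objOff
  simp only [voff] at hobr hoff
  have hps := push_same v.mem (u.reg .rsp - 3008) x (by omega)
  obtain ⟨hinv, hshadow⟩ := push_inv hst.inv hst.shadow (u.reg .rsp - 3008) x (by omega) (by omega)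
  apply stable_of_eqOn hst hsb
  · rw [hwm]
    apply hps.eqOn
    intro w hw
    rw [List.mem_singleton.mp hw]
    simp only []
    omega
  · rw [hwm]
    refine ⟨?_, by simp only [vblock, voff]; omega⟩
    apply hps.eqOn
    intro w hw
    rw [List.mem_singleton.mp hw]
    simp only [vblock, voff]
    omega
  · rw [hwm]
    apply hst.same.step_same hps
    intro w hw a h1 h2
    rw [List.mem_singleton.mp hw] at h1 h2
    simp only [] at h1 h2
    exact covered_footprint others frames len Ar stored room mode ysz u a (Or.inl ⟨by omega, by omega⟩)
  · rw [hwm]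
    exact hshadow
  · rw [hwm]
    exact hinv
  · exact hwr
  · exact hwc
  · exact hwa

/-- **STABLE after one round of the loop**: from STABLE at the head `v`, the state `s` at inverse_mdct's entry (the return
address pushed), the returned state `s'` (footprint, post) and a later state `w` with the same memory, the steady stack pointer,
the text and the ABI's invariant. With it: the slot `[rsp + 0]` and "`*f` reads as at the head". -/
theorem stable_step {ls : Int} {k c : Nat} {s s' w : State} {x : Nat}
    (hst : Stable u₀ others frames len Ar stored room mode ysz u ret ls v) (hsb : slot64 u v 0x0 = sbOf u)
    (hsm : s.mem = v.mem.writeLE (u.reg .rsp - 3008) 8 x)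
    (hsr : (s.reg .rsp).toNat = (u.reg .rsp).toNat - 3008) (hsf : inverse_mdct.f s = fOf u)
    (hpre : inverse_mdct.Pre others (framesIn frames u) len Ar stored room ysz k c s)
    (hsame : Mem.SameExcept ((inverse_mdct.spec others (framesIn frames u) len Ar stored room ysz k c).footprint s)
      s.mem s'.mem)
    (hpost : (inverse_mdct.spec others (framesIn frames u) len Ar stored room ysz k c).post s s')
    (hwm : w.mem = s'.mem) (hwr : w.reg .rsp = spOf u) (hwc : CodeOK u₀ w.mem) (hwa : abiInv w) :
    (Stable u₀ others frames len Ar stored room mode ysz u ret ls w ∧ slot64 u w 0x0 = sbOf u) ∧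
      (objBlock (fOf u)).Kept v.mem w.mem := by
  have hw := where_of hst hsr hsf hpre
  have hw' := hw
  obtain ⟨hroom, htop, hrsp, hfeq, hoin, hooff, hbin, hboff, htlo, htred, hthi, hfull, hain, haoff⟩ := hw'
  have hK : (objBlock (fOf u)).Kept v.mem w.mem := by
    rw [hwm]
    exact round_obj hw hsm hpost
  refine ⟨?_, hK⟩
  apply stable_of_eqOn hst hsb
  · rw [hwm]
    exact round_stack hw hsm hsame
  · exact hK
  · rw [hwm]
    exact round_same hst hw hsm hpre hsame
  · -- the shadow layer, from the callee's post
    have e : (spOf u).toNat = (s.reg .rsp).toNat + 8 := by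
      rw [hrsp]
      have : (u.reg .rsp - 3000).toNat = (u.reg .rsp).toNat - 3000 := by u_omega
      rw [this]
      omega
    rw [e, hwm]
    exact hpost.1
  · -- the invariant, by the decode-time frame over the callee's footprint
    rw [hwm, ← hfeq]
    exact mdct_inv hpre (by omega) (by omega) hsame hpost
  · exact hwr
  · exact hwc
  · exact hwa

/-! ### The loop invariant -/

/-- **The invariant of the inverse-MDCT loop at its head `loop12`** (0x11192b, line 3401), ghost `i`: STABLE ∧ `[rsp + 0] = SB` ∧
`ebx = i ≤ C` ∧ `r13d = n` ∧ `rbp = f` ∧ `r14 = m`. -/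
structure Head (u₀ : State) (others : List Obj) (frames : List (Nat × FrameLayout)) (len : Nat) (Ar : Arena)
    (stored room : Int) (mode : Nat) (ysz : Nat → Nat) (u : State) (ret : Word) (i : Nat) (v : State) : Prop where
  /-- STABLE -/
  stable : Stable u₀ others frames len Ar stored room mode ysz u ret (lsOf u) v
  /-- the head of the loop -/
  rip : v.rip = Vorbis.L.vorbis_decode_packet_rest.loop12
  /-- `[rsp + 0] = SB` (carried for segment .13) -/
  slot_sb0 : slot64 u v 0x0 = sbOf u
  /-- `ebx = i` -/
  rbx : v.reg .rbx = UInt64.ofNat i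
  /-- `r13d = n` -/
  r13 : (v.reg .r13).toNat = nOf v.mem (fOf u) (mOf u)
  /-- `rbp = f` -/
  rbp : v.reg .rbp = u.reg .rdi
  /-- `r14 = m` -/
  r14 : v.reg .r14 = u.reg .rdx
  /-- `i ≤ C` -/
  i_le : (i : Int) ≤ stb_vorbis.channels v.mem (fOf u)

/-- The mode index is a mode in the memory of a cut point too (`mode_count` is no decode-time hole). -/
theorem mode_lt_now (h : Frame u₀ others frames len Ar stored room mode ysz u ret v) :
    (mode : Int) < stb_vorbis.mode_count v.mem (fOf u) := by
  have hargs : Args others frames mode u := h.pre.2.2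
  have hd := frame_decodeSame h
  have e : stb_vorbis.mode_count v.mem (fOf u) = stb_vorbis.mode_count u.mem (fOf u) := by
    simp only [vacc, voff]
    exact hd.i32 480 (by decide)
  rw [e]
  exact hargs.mode_lt

/-- `n`, the block size of the frame, is a legal block size: it has an `ld`, and fits 13 bits. -/
theorem n_ld (h : Frame u₀ others frames len Ar stored room mode ysz u ret v) :
    ∃ k, Mdct.Ld (nOf v.mem (fOf u) (mOf u)) k := by
  unfold nOf
  exact (Real.VorbisOK.hd3 h.inv.fb.vorbis).size _

/-- The channel count at a cut point is between 1 and 16 (HD1). -/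
theorem chan_le (h : Frame u₀ others frames len Ar stored room mode ysz u ret v) :
    1 ≤ stb_vorbis.channels v.mem (fOf u) ∧ stb_vorbis.channels v.mem (fOf u) ≤ 16 :=
  h.inv.config.header.HD1

/-- **A check site at a field of `*f`** (`[f + off]`, `off + n ≤ 1808`) at a cut point, as `Site`. -/
theorem site_objField (h : Frame u₀ others frames len Ar stored room mode ysz u ret v) (off n : Nat) (ho : off + n ≤ 1808)
    (hn : 1 ≤ n) : Site (Live (stackObjs (framesIn frames u) ++ others)) (fOf u + off) n :=
  h.inv.fb.vorbis.bits.site_field h.inv.live off n ho hn rfl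

/-- The mode record `m` of the arguments is the record `mode < 64` of `*f`. -/
theorem modeRec_eq (h : Frame u₀ others frames len Ar stored room mode ysz u ret v) :
    mOf u = fOf u + 484 + 6 * mode ∧ mode < 64 := by
  have hargs : Args others frames mode u := h.pre.2.2
  have e := hargs.m_eq
  simp only [vacc, voff] at e
  exact ⟨e, mode_lt_64 h⟩

/-- **inverse_mdct's precondition at the call of line 3402** (0x111923), from the loop invariant at the head `v` and what the
walker knows of the state `s` at the callee's entry: the return address pushed below the steady stack pointer, `rdx = f`,
`rdi = f->channel_buffers[i]`, `esi = n`, `ecx = m->blockflag`; `i < C` from the loop test; `k` the `ld` of `n`. -/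
theorem call_pre {i k : Nat} {s : State} {x : Nat}
    (hh : Head u₀ others frames len Ar stored room mode ysz u ret i v)
    (hsm : s.mem = v.mem.writeLE (u.reg .rsp - 3008) 8 x)
    (hsr : (s.reg .rsp).toNat = (u.reg .rsp).toNat - 3008)
    (hrdx : s.reg .rdx = u.reg .rdi)
    (hrdi : (s.reg .rdi).toNat = stb_vorbis.channel_buffers v.mem (fOf u) i)
    (hrsi : (s.reg .rsi).toNat % 2 ^ 32 = nOf v.mem (fOf u) (mOf u))
    (hrcx : (s.reg .rcx).toNat % 2 ^ 32 = Mode.blockflag v.mem (mOf u))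
    (hi : (i : Int) < stb_vorbis.channels v.mem (fOf u))
    (hk : Mdct.Ld (nOf v.mem (fOf u) (mOf u)) k) :
    inverse_mdct.Pre others (framesIn frames u) len Ar stored room ysz k i s := by
  have hst := hh.stable
  obtain ⟨hroom, htop⟩ := frame_room hst.toFrame
  have hp := toNat_push_slot (u.reg .rsp) (by omega)
  have hobr := hst.inv.fb.vorbis.bits.OBR
  have hoff := hst.inv.objOff
  simp only [voff] at hobr hoff
  have hps := push_same v.mem (u.reg .rsp - 3008) x (by omega)
  obtain ⟨hinv, hshadow⟩ := push_inv hst.inv hst.shadow (u.reg .rsp - 3008) x (by omega) (by omega)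
  rw [← hsm] at hinv hshadow
  have hK : (objBlock (fOf u)).Kept v.mem s.mem := by
    rw [hsm]
    refine ⟨?_, by simp only [vblock, voff]; omega⟩
    apply hps.eqOn
    intro w hw
    rw [List.mem_singleton.mp hw]
    simp only [vblock, voff]
    omega
  have hf : inverse_mdct.f s = fOf u := by
    rw [inverse_mdct.f_def, hrdx]
  have hc16 := (chan_le hst.toFrame).2
  obtain ⟨hm, hmd⟩ := modeRec_eq hst.toFrame
  have hbf : Mode.blockflag s.mem (mOf u) = Mode.blockflag v.mem (mOf u) := by
    simp only [vacc, voff]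
    exact hK.u8 _ (by simp only [vblock]; omega) (by simp only [vblock, voff]; omega)
  have hbs : ∀ b, bsize s.mem (fOf u) b = bsize v.mem (fOf u) b := by
    apply bsize_congr
    · simp only [vacc, voff]
      exact hK.i32 _ (by simp only [vblock]; omega) (by simp only [vblock, voff]; omega)
    · simp only [vacc, voff]
      exact hK.i32 _ (by simp only [vblock]; omega) (by simp only [vblock, voff]; omega)
  have hargs : Args others frames mode u := hst.pre.2.2
  apply inverse_mdct.pre_of_fb
  · -- the shadow clause: the layer of the cut point, no shadow byte written, the clean stack ends at the steady rsp
    refine ⟨?_, (hst.pre.1).offText⟩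
    have e : (s.reg .rsp).toNat + 8 = (spOf u).toNat := by
      rw [hsr]
      have : (u.reg .rsp - 3000).toNat = (u.reg .rsp).toNat - 3000 := by u_omega
      rw [this]
      omega
    rw [e]
    exact hshadow
  · rw [hf]
    exact hinv
  · rw [hf, channels_kept hK]
    exact hi
  · rw [inverse_mdct.buf_def, hf, hrdi]
    simp only [vacc, voff]
    exact (hK.ptr _ (by simp only [vblock]; omega) (by simp only [vblock, voff]; omega)).symm
  · rw [inverse_mdct.bt_def, hrcx, hargs.m_eq]
    exact Nat.lt_succ_of_le (hst.inv.fb.vorbis.mode.blockflag_le (mode_lt_now hst.toFrame))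
  · rw [inverse_mdct.n_def, inverse_mdct.bt_def, hrsi, hrcx, hf, hbs]
    rfl
  · rw [inverse_mdct.n_def, hrsi]
    exact hk

/-! ### The walker's bit-level forms of the loop counter and the arguments, as numbers -/

/-- `movsxd rax, ebx` of a counter below 16. -/
theorem sext_small (i : Nat) (hi : i < 16) :
    Word.ofBV (BitVec.signExtend 64 (Word.part .w32 (UInt64.ofNat i))) = UInt64.ofNat i := by
  have h : ∀ j : Fin 16,
      Word.ofBV (BitVec.signExtend 64 (Word.part .w32 (UInt64.ofNat j.val))) = UInt64.ofNat j.val := by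
    decide
  exact h ⟨i, hi⟩

/-- The signed value of `ebx` for a counter of at most 16. -/
theorem toInt_counter (i : Nat) (hi : i ≤ 16) : (Word.part .w32 (UInt64.ofNat i)).toInt = (i : Int) := by
  have h : ∀ j : Fin 17, (Word.part .w32 (UInt64.ofNat j.val)).toInt = (j.val : Int) := by
    decide
  exact h ⟨i, by omega⟩

/-- `add ebx, 1` of a counter below 16. -/
theorem inc_small (i : Nat) (hi : i < 16) :
    Word.ofBV (Word.part .w32 (UInt64.ofNat i) + 1#32) = UInt64.ofNat (i + 1) := by
  have h : ∀ j : Fin 16, Word.ofBV (Word.part .w32 (UInt64.ofNat j.val) + 1#32) = UInt64.ofNat (j.val + 1) := by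
    decide
  exact h ⟨i, hi⟩

/-- `movzx r12d, BYTE PTR [r14] ; movzx ecx, r12b`: ecx is the byte. -/
theorem rcx_val (R : Nat) (hR : R < 256) :
    (Word.ofBV (BitVec.zeroExtend 32 (BitVec.setWidth 8 (BitVec.zeroExtend 32 (BitVec.ofNat 8 R))))).toNat % 2 ^ 32
      = R := by
  rw [Vorbis.toNat_ofBV32]
  simp only [BitVec.zeroExtend, BitVec.toNat_setWidth, BitVec.toNat_ofNat]
  omega

/-- `mov esi, r13d` of a 32-bit value. -/
theorem rsi_val (r : Word) (h : r.toNat < 2 ^ 32) : (Word.ofBV (Word.part .w32 r)).toNat % 2 ^ 32 = r.toNat := by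
  rw [Vorbis.toNat_ofBV32, Vorbis.toNat_part32]
  omega

/-- **A field of `*f` read through the pushed return address** of a check call or of the call of inverse_mdct. -/
theorem read_push_obj (h : Frame u₀ others frames len Ar stored room mode ysz u ret v) (x off n : Nat)
    (ho : off + n ≤ 1808) :
    (v.mem.writeLE (u.reg .rsp - 3008) 8 x).readLE (addr (fOf u + off)) n = v.mem.readLE (addr (fOf u + off)) n := by
  obtain ⟨hroom, htop⟩ := frame_room h
  have hp := toNat_push_slot (u.reg .rsp) (by omega)
  have hobr := h.inv.fb.vorbis.bits.OBR
  have hoff := h.inv.objOff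
  simp only [voff] at hobr hoff
  have ha : (addr (fOf u + off)).toNat = fOf u + off := toNat_addr _ (by omega)
  apply (push_same v.mem (u.reg .rsp - 3008) x (by omega)).readLE
  · omega
  · intro w hw
    rw [List.mem_singleton.mp hw]
    simp only []
    omega

/-- The loop test `cmp DWORD PTR [rbp+4], ebx ; jg` as the walker states it (the load read through the pushed return address of
the check call) is `i < f->channels`. -/
theorem branch_iff (h : Frame u₀ others frames len Ar stored room mode ysz u ret v) (x : Nat) {i : Nat} (hi : i ≤ 16) :
    ((Word.part .w32 (UInt64.ofNat i)).toInt <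
      (BitVec.ofNat 32 ((v.mem.writeLE (u.reg .rsp - 3008) 8 x).readLE (u.reg .rdi + 4) 4)).toInt) ↔
    (i : Int) < stb_vorbis.channels v.mem (fOf u) := by
  have e : u.reg .rdi + 4 = addr (fOf u + 4) := by
    rw [eq_addr (u.reg .rdi) (fOf u) rfl]
    simp only [vfield]
  rw [e, read_push_obj h x 4 4 (by omega), toInt_counter i hi]
  simp only [vfield, vacc, voff]

/-- `rdi` at the call of inverse_mdct: the load `mov rdi, [rbp + r15*8 + 8]` (read through the pushed return address of the
check call) is `f->channel_buffers[i]`. -/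
theorem rdi_val (h : Frame u₀ others frames len Ar stored room mode ysz u ret v) (x : Nat) {i : Nat} (hi : i < 16) :
    (UInt64.ofNat ((v.mem.writeLE (u.reg .rsp - 3008) 8 x).readLE
      (u.reg .rdi + (Word.ofBV (BitVec.signExtend 64 (Word.part .w32 (UInt64.ofNat i))) + 108) * 8 + 8) 8)).toNat =
    stb_vorbis.channel_buffers v.mem (fOf u) i := by
  have e : u.reg .rdi + (Word.ofBV (BitVec.signExtend 64 (Word.part .w32 (UInt64.ofNat i))) + 108) * 8 + 8 =
      addr (fOf u + (872 + 8 * i)) := by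
    rw [sext_small i hi, eq_addr (u.reg .rdi) (fOf u) rfl, show UInt64.ofNat i = addr i from rfl]
    simp only [vfield]
    apply congrArg addr
    omega
  rw [e, read_push_obj h x (872 + 8 * i) 8 (by omega)]
  simp only [vacc, voff]
  have hlt := Mem.u64_lt v.mem (fOf u + 872 + 8 * i)
  rw [← Nat.add_assoc]
  exact toNat_addr _ hlt

/-- The byte `m->blockflag` read through the pushed return address of the check call. -/
theorem blockflag_val (h : Frame u₀ others frames len Ar stored room mode ysz u ret v) (x : Nat) :
    (v.mem.writeLE (u.reg .rsp - 3008) 8 x).readLE (u.reg .rdx) 1 = Mode.blockflag v.mem (mOf u) ∧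
      Mode.blockflag v.mem (mOf u) < 256 := by
  obtain ⟨hm, hmd⟩ := modeRec_eq h
  have e : u.reg .rdx = addr (fOf u + (484 + 6 * mode)) := by
    apply eq_addr
    show mOf u = _
    omega
  constructor
  · rw [e, read_push_obj h x (484 + 6 * mode) 1 (by omega), hm]
    simp only [vacc, voff, vfield]
    rw [show fOf u + (484 + 6 * mode) = fOf u + 484 + 6 * mode + 0 from by omega]
  · simp only [vacc, voff]
    exact Mem.u8_lt _ _

end Vorbis.Spec.vorbis_decode_packet_rest_12
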